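-- pv_equiv track=rewrite | github.com/urasil/FOLSAT | tableau.py | findMiddleConnectiveIndex
-- ===== SOURCE A (Python) =====
-- def findMiddleConnectiveIndex(tokens):
--     leftCount = 0
--     for i in range(len(tokens)):
--         if tokens[i][0] == "CONNECTIVE" and leftCount == 1:
--             return i
--         elif tokens[i][0] == "LEFT":
--             leftCount += 1
--         elif tokens[i][0] == "CLOSE":
--             leftCount -= 1
--         else:
--             continue
--     return -1
-- ===== SOURCE B (Python) =====
-- def findMiddleConnectiveIndex(tokens):
--     # build prefix-depth table: depth[i] = depth BEFORE processing token i
--     depth = []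
--     d = 0
--     for t in tokens:
--         depth.append(d)
--         if t[0] == "LEFT":
--             d += 1
--         elif t[0] == "CLOSE":
--             d -= 1
--     for i in range(len(tokens)):
--         if tokens[i][0] == "CONNECTIVE" and depth[i] == 1:
--             return i
--     return -1
-- ===== Notes on version B (the rewrite author's own statement) =====
-- stated objective: alternative
-- what changed: Replaces the fused scan keeping a running bracket counter with a two-phase shape: first build a prefix-depth table, then search for the first CONNECTIVE token at depth 1.
import Mathlib
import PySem

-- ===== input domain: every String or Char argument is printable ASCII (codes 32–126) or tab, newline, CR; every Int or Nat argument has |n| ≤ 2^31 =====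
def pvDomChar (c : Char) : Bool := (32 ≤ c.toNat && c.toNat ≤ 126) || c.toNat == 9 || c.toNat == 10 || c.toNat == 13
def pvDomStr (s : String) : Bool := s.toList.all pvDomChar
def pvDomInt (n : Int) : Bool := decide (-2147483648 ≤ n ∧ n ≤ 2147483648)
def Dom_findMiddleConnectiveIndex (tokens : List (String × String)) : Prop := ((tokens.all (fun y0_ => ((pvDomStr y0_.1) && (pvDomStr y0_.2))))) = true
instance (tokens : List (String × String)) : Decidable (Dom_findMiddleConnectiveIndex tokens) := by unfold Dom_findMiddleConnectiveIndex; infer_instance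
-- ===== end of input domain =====

-- B replaces the fused counter scan by build-prefix-depth-table then search; alternative decomposition, same cost.


-- ===== PORT A =====
-- fused scan: running bracket counter, check-before-update
def pvGoA : List (String × String) → Int → Int → Int
  | [], _, _ => -1
  | t :: rest, i, c =>
    if t.1 == "CONNECTIVE" && c == 1 then i
    else if t.1 == "LEFT" then pvGoA rest (i + 1) (c + 1)
    else if t.1 == "CLOSE" then pvGoA rest (i + 1) (c - 1)
    else pvGoA rest (i + 1) c

def findMiddleConnectiveIndex (tokens : List (String × String)) : Int :=
  pvGoA tokens 0 0

-- ===== PORT B =====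
-- phase 1: prefix-depth table, depth before each token
def pvDepths : List (String × String) → Int → List Int
  | [], _ => []
  | t :: rest, d =>
    d :: pvDepths rest (if t.1 == "LEFT" then d + 1 else if t.1 == "CLOSE" then d - 1 else d)

-- phase 2: first index whose token is CONNECTIVE at depth 1
def pvSearch : List (String × String) → List Int → Int → Int
  | t :: ts, d :: ds, i => if t.1 == "CONNECTIVE" && d == 1 then i else pvSearch ts ds (i + 1)
  | _, _, _ => -1

def findMiddleConnectiveIndex_alt (tokens : List (String × String)) : Int :=
  pvSearch tokens (pvDepths tokens 0) 0

-- ===== PRECONDITION & SPEC =====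
def Spec_findMiddleConnectiveIndex (tokens : List (String × String)) (out : Int) : Prop := out = findMiddleConnectiveIndex_alt tokens
instance (tokens : List (String × String)) (out : Int) : Decidable (Spec_findMiddleConnectiveIndex tokens out) := by unfold Spec_findMiddleConnectiveIndex; infer_instance

-- ===== CLAIM (what is proved, stated in full; the proofs are below) =====
def Claim_equal_findMiddleConnectiveIndex : Prop := ∀ (tokens : List (String × String)), Dom_findMiddleConnectiveIndex tokens → Spec_findMiddleConnectiveIndex tokens (findMiddleConnectiveIndex tokens)

-- ===== LEMMAS AND PROOFS =====
theorem pvGoA_eq_search : ∀ (ts : List (String × String)) (i c : Int),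
    pvGoA ts i c = pvSearch ts (pvDepths ts c) i := by
  intro ts
  induction ts with
  | nil => intro i c; simp [pvGoA, pvSearch]
  | cons t rest ih =>
    intro i c
    simp only [pvGoA, pvDepths, pvSearch]
    by_cases h1 : (t.1 == "CONNECTIVE" && c == 1) = true
    · simp only [h1, if_pos]
    · simp only [h1, if_neg, Bool.not_eq_true] at *
      simp [h1]
      by_cases h2 : t.1 = "LEFT"
      · simp [h2, ih]
      · by_cases h3 : t.1 = "CLOSE" <;> simp [h2, h3, ih]

-- ===== VERDICT (by name: the statement is the Claim_ definition above) =====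
theorem findMiddleConnectiveIndex_spec : Claim_equal_findMiddleConnectiveIndex := by
  intro tokens _
  unfold Spec_findMiddleConnectiveIndex findMiddleConnectiveIndex findMiddleConnectiveIndex_alt
  exact pvGoA_eq_search tokens 0 0
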